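-- pv_equiv track=rewrite | github.com/Khushvakht799/GUI_Constructor | src/plugins/refactor_plugin.py | optimize_imports
-- ===== SOURCE A (Python) =====
-- def optimize_imports(code: str) -> str:
--     """Optimize import statements in code"""
--     lines = code.split('\n')
--     import_lines = []
--     other_lines = []
--
--     for line in lines:
--         stripped = line.strip()
--         if stripped.startswith(('import ', 'from ')):
--             import_lines.append(line)
--         else:
--             other_lines.append(line)
--
--     # Sort imports
--     import_lines.sort(key=lambda x: (
--         0 if x.startswith('from __future__') else
--         1 if x.startswith('import ') else
--         2 if x.startswith('from ') else 3
--     ))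
--
--     # Combine with blank line between imports and code
--     optimized = '\n'.join(import_lines)
--     if import_lines and other_lines:
--         optimized += '\n\n'
--     optimized += '\n'.join(other_lines)
--
--     return optimized
-- ===== SOURCE B (Python) =====
-- def optimize_imports(code: str) -> str:
--     """Optimize import statements in code (single-pass bucket version)"""
--     future, plain, from_imp, misc, other = [], [], [], [], []
--     for line in code.split('\n'):
--         s = line.strip()
--         if s.startswith('import ') or s.startswith('from '):
--             if line.startswith('from __future__'):
--                 future.append(line)
--             elif line.startswith('import '):
--                 plain.append(line)
--             elif line.startswith('from '):
--                 from_imp.append(line)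
--             else:
--                 misc.append(line)
--         else:
--             other.append(line)
--     imports = future + plain + from_imp + misc
--     if imports and other:
--         return '\n'.join(imports) + '\n\n' + '\n'.join(other)
--     return '\n'.join(imports) + '\n'.join(other)
-- ===== Notes on version B (the rewrite author's own statement) =====
-- stated objective: alternative
-- what changed: Replaces the stable key-based comparison sort of the import lines with a single-pass distribution into four category buckets (future / import / from / other) that are concatenated in key order, which yields the same order because the original sort is stable; the partition and bucketing happen in one loop.
import Mathlib
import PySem

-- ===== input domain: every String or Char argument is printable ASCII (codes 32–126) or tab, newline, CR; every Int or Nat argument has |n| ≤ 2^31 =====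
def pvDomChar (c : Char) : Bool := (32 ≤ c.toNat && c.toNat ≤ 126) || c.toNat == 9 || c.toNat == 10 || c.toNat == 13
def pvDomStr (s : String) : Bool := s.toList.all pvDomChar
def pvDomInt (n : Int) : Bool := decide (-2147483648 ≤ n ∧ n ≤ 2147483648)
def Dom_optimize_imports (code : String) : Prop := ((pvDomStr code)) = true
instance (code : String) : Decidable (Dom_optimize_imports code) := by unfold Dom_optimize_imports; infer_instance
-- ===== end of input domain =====

-- B replaces A's stable key-sort of the import lines by a one-pass distribution into
-- four category buckets concatenated in key order (objective: alternative algorithm).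

-- ===== PORT A =====
-- the sort key lambda of A
def pvKeyA (x : String) : Int :=
  if PySem.Str.startswith x "from __future__" then 0
  else if PySem.Str.startswith x "import " then 1
  else if PySem.Str.startswith x "from " then 2
  else 3

-- the body of A's partition loop
def pvStepA (acc : List String × List String) (line : String) : List String × List String :=
  let stripped := PySem.Str.strip line
  if PySem.Str.startswith stripped "import " || PySem.Str.startswith stripped "from " then
    (acc.1 ++ [line], acc.2)
  else
    (acc.1, acc.2 ++ [line])

def optimize_imports (code : String) : String :=
  let lines := (PySem.Str.split? code "\n").getD []
  let pr := lines.foldl pvStepA ([], [])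
  let import_lines := PySem.List.sorted pr.1 pvKeyA
  let optimized := PySem.Str.join "\n" import_lines
  (if !import_lines.isEmpty && !pr.2.isEmpty then optimized ++ "\n\n" else optimized)
    ++ PySem.Str.join "\n" pr.2

-- ===== PORT B =====
-- B's loop state: the four import buckets and the non-import lines
structure PvSt where
  f : List String
  p : List String
  fr : List String
  m : List String
  o : List String
deriving Repr, DecidableEq

-- the body of B's single classification loop
def pvStepB (st : PvSt) (line : String) : PvSt :=
  let s := PySem.Str.strip line
  if PySem.Str.startswith s "import " || PySem.Str.startswith s "from " then
    if PySem.Str.startswith line "from __future__" then { st with f := st.f ++ [line] }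
    else if PySem.Str.startswith line "import " then { st with p := st.p ++ [line] }
    else if PySem.Str.startswith line "from " then { st with fr := st.fr ++ [line] }
    else { st with m := st.m ++ [line] }
  else { st with o := st.o ++ [line] }

def optimize_imports_alt (code : String) : String :=
  let st := ((PySem.Str.split? code "\n").getD []).foldl pvStepB ⟨[], [], [], [], []⟩
  let imports := st.f ++ st.p ++ st.fr ++ st.m
  if !imports.isEmpty && !st.o.isEmpty then
    (PySem.Str.join "\n" imports ++ "\n\n") ++ PySem.Str.join "\n" st.o
  else
    PySem.Str.join "\n" imports ++ PySem.Str.join "\n" st.o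

-- ===== PRECONDITION & SPEC =====
def Spec_optimize_imports (code : String) (out : String) : Prop := out = optimize_imports_alt code
instance (code : String) (out : String) : Decidable (Spec_optimize_imports code out) := by unfold Spec_optimize_imports; infer_instance

-- ===== CLAIM (what is proved, stated in full; the proofs are below) =====
def Claim_equal_optimize_imports : Prop := ∀ (code : String), Dom_optimize_imports code → Spec_optimize_imports code (optimize_imports code)

-- ===== LEMMAS AND PROOFS =====
-- "this line is an import line" (A's partition test = B's outer test)
def pvIsImp (line : String) : Bool :=
  PySem.Str.startswith (PySem.Str.strip line) "import "
    || PySem.Str.startswith (PySem.Str.strip line) "from "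

-- "import line of bucket i"
def pvC (i : Int) (l : String) : Bool := pvIsImp l && (pvKeyA l == i)

lemma pvKeyA_range (x : String) : pvKeyA x = 0 ∨ pvKeyA x = 1 ∨ pvKeyA x = 2 ∨ pvKeyA x = 3 := by
  unfold pvKeyA; split_ifs <;> simp

lemma pvStepA_eq (acc : List String × List String) (line : String) :
    pvStepA acc line
      = if pvIsImp line then (acc.1 ++ [line], acc.2) else (acc.1, acc.2 ++ [line]) := rfl

lemma pvStepB_eq (st : PvSt) (line : String) :
    pvStepB st line
      = if pvIsImp line then
          (if PySem.Str.startswith line "from __future__" then { st with f := st.f ++ [line] }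
           else if PySem.Str.startswith line "import " then { st with p := st.p ++ [line] }
           else if PySem.Str.startswith line "from " then { st with fr := st.fr ++ [line] }
           else { st with m := st.m ++ [line] })
        else { st with o := st.o ++ [line] } := rfl

lemma foldA (ls : List String) (imp oth : List String) :
    ls.foldl pvStepA (imp, oth)
      = (imp ++ ls.filter pvIsImp, oth ++ ls.filter (fun l => !pvIsImp l)) := by
  induction ls generalizing imp oth with
  | nil => simp
  | cons x xs ih =>
    simp only [List.foldl_cons, pvStepA_eq]
    by_cases h : pvIsImp x <;> simp [h, ih]

lemma foldB (ls : List String) (st : PvSt) :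
    ls.foldl pvStepB st
      = ⟨st.f ++ ls.filter (pvC 0), st.p ++ ls.filter (pvC 1), st.fr ++ ls.filter (pvC 2),
         st.m ++ ls.filter (pvC 3), st.o ++ ls.filter (fun l => !pvIsImp l)⟩ := by
  induction ls generalizing st with
  | nil => simp
  | cons x xs ih =>
    simp only [List.foldl_cons, pvStepB_eq]
    by_cases him : pvIsImp x
    · rw [if_pos him]
      by_cases h0 : PySem.Str.startswith x "from __future__" = true
      · have hk : pvKeyA x = 0 := by unfold pvKeyA; rw [if_pos h0]
        rw [if_pos h0, ih]
        simp [pvC, him, hk]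
      · rw [if_neg h0]
        by_cases h1 : PySem.Str.startswith x "import " = true
        · have hk : pvKeyA x = 1 := by unfold pvKeyA; rw [if_neg h0, if_pos h1]
          rw [if_pos h1, ih]
          simp [pvC, him, hk]
        · rw [if_neg h1]
          by_cases h2 : PySem.Str.startswith x "from " = true
          · have hk : pvKeyA x = 2 := by unfold pvKeyA; rw [if_neg h0, if_neg h1, if_pos h2]
            rw [if_pos h2, ih]
            simp [pvC, him, hk]
          · have hk : pvKeyA x = 3 := by unfold pvKeyA; rw [if_neg h0, if_neg h1, if_neg h2]
            rw [if_neg h2, ih]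
            simp [pvC, him, hk]
    · rw [if_neg him, ih]
      simp [pvC, him]

lemma insertBy_skip {α : Type} (before : α → α → Bool) (x : α) (ys zs : List α)
    (h : ∀ y ∈ ys, before x y = false) :
    PySem.List.insertBy before x (ys ++ zs) = ys ++ PySem.List.insertBy before x zs := by
  induction ys with
  | nil => simp
  | cons y ys ih =>
    simp only [List.cons_append, PySem.List.insertBy, h y (by simp)]
    simp [ih (fun y hy => h y (by simp [hy]))]

lemma insertBy_front {α : Type} (before : α → α → Bool) (x : α) (zs : List α)
    (h : ∀ z ∈ zs, before x z = true) :
    PySem.List.insertBy before x zs = x :: zs := by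
  cases zs with
  | nil => simp [PySem.List.insertBy]
  | cons z zs => simp [PySem.List.insertBy, h z (by simp)]

lemma insertBy_last {α : Type} (before : α → α → Bool) (x : α) (ys : List α)
    (h : ∀ y ∈ ys, before x y = false) :
    PySem.List.insertBy before x ys = ys ++ [x] := by
  have := insertBy_skip before x ys [] h
  simpa [PySem.List.insertBy] using this

lemma sort4 (xs b0 b1 b2 b3 : List String)
    (h0 : ∀ y ∈ b0, pvKeyA y = 0) (h1 : ∀ y ∈ b1, pvKeyA y = 1)
    (h2 : ∀ y ∈ b2, pvKeyA y = 2) (h3 : ∀ y ∈ b3, pvKeyA y = 3) :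
    xs.foldl (fun acc x => PySem.List.insertBy (fun a b => decide (pvKeyA a < pvKeyA b)) x acc)
        (b0 ++ (b1 ++ (b2 ++ b3)))
      = (b0 ++ xs.filter (fun l => pvKeyA l == 0)) ++ ((b1 ++ xs.filter (fun l => pvKeyA l == 1))
          ++ ((b2 ++ xs.filter (fun l => pvKeyA l == 2)) ++ (b3 ++ xs.filter (fun l => pvKeyA l == 3)))) := by
  induction xs generalizing b0 b1 b2 b3 with
  | nil => simp
  | cons x xs ih =>
    simp only [List.foldl_cons]
    rcases pvKeyA_range x with hx | hx | hx | hx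
    · rw [insertBy_skip _ _ b0 _ (fun y hy => by simp [hx, h0 y hy]),
        insertBy_front _ _ _ (by
          intro z hz
          simp only [List.mem_append] at hz
          rcases hz with hz | hz | hz <;>
            first
            | (simp [h1 z hz, hx])
            | (simp [h2 z hz, hx])
            | (simp [h3 z hz, hx]))]
      have e : b0 ++ (x :: (b1 ++ (b2 ++ b3))) = (b0 ++ [x]) ++ (b1 ++ (b2 ++ b3)) := by simp
      rw [e, ih (b0 ++ [x]) b1 b2 b3
        (by intro y hy
            rcases List.mem_append.mp hy with hy | hy
            · exact h0 y hy
            · simp only [List.mem_singleton] at hy; simpa [hy] using hx) h1 h2 h3]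
      simp [hx, List.append_assoc]
    · rw [insertBy_skip _ _ b0 _ (fun y hy => by simp [hx, h0 y hy]),
        insertBy_skip _ _ b1 _ (fun y hy => by simp [hx, h1 y hy]),
        insertBy_front _ _ _ (by
          intro z hz
          simp only [List.mem_append] at hz
          rcases hz with hz | hz <;>
            first
            | (simp [h2 z hz, hx])
            | (simp [h3 z hz, hx]))]
      have e : b0 ++ (b1 ++ (x :: (b2 ++ b3))) = b0 ++ ((b1 ++ [x]) ++ (b2 ++ b3)) := by simp
      rw [e, ih b0 (b1 ++ [x]) b2 b3 h0
        (by intro y hy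
            rcases List.mem_append.mp hy with hy | hy
            · exact h1 y hy
            · simp only [List.mem_singleton] at hy; simpa [hy] using hx) h2 h3]
      simp [hx, List.append_assoc]
    · rw [insertBy_skip _ _ b0 _ (fun y hy => by simp [hx, h0 y hy]),
        insertBy_skip _ _ b1 _ (fun y hy => by simp [hx, h1 y hy]),
        insertBy_skip _ _ b2 _ (fun y hy => by simp [hx, h2 y hy]),
        insertBy_front _ _ _ (fun z hz => by simp [h3 z hz, hx])]
      have e : b0 ++ (b1 ++ (b2 ++ (x :: b3))) = b0 ++ (b1 ++ ((b2 ++ [x]) ++ b3)) := by simp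
      rw [e, ih b0 b1 (b2 ++ [x]) b3 h0 h1
        (by intro y hy
            rcases List.mem_append.mp hy with hy | hy
            · exact h2 y hy
            · simp only [List.mem_singleton] at hy; simpa [hy] using hx) h3]
      simp [hx, List.append_assoc]
    · rw [insertBy_skip _ _ b0 _ (fun y hy => by simp [hx, h0 y hy]),
        insertBy_skip _ _ b1 _ (fun y hy => by simp [hx, h1 y hy]),
        insertBy_skip _ _ b2 _ (fun y hy => by simp [hx, h2 y hy]),
        insertBy_last _ _ b3 (fun y hy => by simp [hx, h3 y hy])]
      have e : b0 ++ (b1 ++ (b2 ++ (b3 ++ [x]))) = b0 ++ (b1 ++ (b2 ++ (b3 ++ [x]))) := rfl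
      rw [e, ih b0 b1 b2 (b3 ++ [x]) h0 h1 h2
        (by intro y hy
            rcases List.mem_append.mp hy with hy | hy
            · exact h3 y hy
            · simp only [List.mem_singleton] at hy; simpa [hy] using hx)]
      simp [hx, List.append_assoc]

lemma filterC (i : Int) (ls : List String) :
    (ls.filter pvIsImp).filter (fun l => pvKeyA l == i) = ls.filter (pvC i) := by
  rw [List.filter_filter]
  exact List.filter_congr (by intro x _; simp [pvC, Bool.and_comm])

lemma sortedA (ls : List String) :
    PySem.List.sorted (ls.filter pvIsImp) pvKeyA
      = ls.filter (pvC 0) ++ (ls.filter (pvC 1) ++ (ls.filter (pvC 2) ++ ls.filter (pvC 3))) := by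
  rw [PySem.List.sorted_eq_foldl_insertBy]
  have h := sort4 (ls.filter pvIsImp) [] [] [] []
    (by simp) (by simp) (by simp) (by simp)
  simp only [List.nil_append, filterC] at h
  exact h

lemma pv_if_append (c : Prop) [Decidable c] (x y z : String) :
    (if c then x ++ y else x) ++ z = if c then x ++ y ++ z else x ++ z := by
  split <;> rfl

set_option maxHeartbeats 1000000 in
theorem optimize_imports_spec : Claim_equal_optimize_imports := by
  intro code _
  unfold Spec_optimize_imports
  simp only [optimize_imports, optimize_imports_alt, foldA, foldB, sortedA, List.nil_append]
  rw [pv_if_append]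
  simp only [← List.append_assoc]
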